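-- pv_equiv track=rewrite | github.com/hyunjun/practice | python/problem-matrix/find_word_snake_inside_a_matrix.py | wordSnake
-- ===== SOURCE A (Python) =====
-- from collections import defaultdict
--
-- def wordSnake(board, word):
--     if board is None or 0 == len(board) or 0 == len(board[0]):
--         return False
--     if word is None or 0 == len(word):
--         return True
--     d, R, C = defaultdict(list), len(board), len(board[0])
--     for r in range(R):
--         for c in range(C):
--             d[board[r][c]].append([r, c])
--
--     def traverse(visited, remains):
--         if 0 == len(remains):
--             if len(visited) == len(set(visited)):
--                 return True
--             return False
--         for r, c in d[remains[0]]: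
--             if 0 < len(visited) and not ((abs(visited[-1][0] - r) == 1 and visited[-1][1] == c) or (visited[-1][0] == r and abs(visited[-1][1] - c) == 1)):
--                 continue
--             visited.append((r, c))
--             if traverse(visited, remains[1:]):
--                 return True
--             visited.pop()
--         return False
--
--     return traverse([], word)
-- ===== SOURCE B (Python) =====
-- def wordSnake(board, word):
--     if board is None or 0 == len(board) or 0 == len(board[0]):
--         return False
--     if word is None or 0 == len(word):
--         return True
--     R, C = len(board), len(board[0])
--
--     def dfs(r, c, rest, visited):
--         if not rest:
--             return True
--         for nr, nc in ((r + 1, c), (r - 1, c), (r, c + 1), (r, c - 1)):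
--             if 0 <= nr < R and 0 <= nc < C and (nr, nc) not in visited \
--                     and board[nr][nc] == rest[0]:
--                 visited.add((nr, nc))
--                 if dfs(nr, nc, rest[1:], visited):
--                     return True
--                 visited.discard((nr, nc))
--         return False
--
--     return any(board[r][c] == word[0] and dfs(r, c, word[1:], {(r, c)})
--                for r in range(R) for c in range(C))
-- ===== Notes on version B (the rewrite author's own statement) =====
-- stated objective: idiomatic
-- what changed: B drops A's char-to-cell-list index and end-of-path duplicate check and does the standard word-search backtracking DFS from each starting cell over the four grid neighbours with a visited set enforcing self-avoidance along the way.
import Mathlib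
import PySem

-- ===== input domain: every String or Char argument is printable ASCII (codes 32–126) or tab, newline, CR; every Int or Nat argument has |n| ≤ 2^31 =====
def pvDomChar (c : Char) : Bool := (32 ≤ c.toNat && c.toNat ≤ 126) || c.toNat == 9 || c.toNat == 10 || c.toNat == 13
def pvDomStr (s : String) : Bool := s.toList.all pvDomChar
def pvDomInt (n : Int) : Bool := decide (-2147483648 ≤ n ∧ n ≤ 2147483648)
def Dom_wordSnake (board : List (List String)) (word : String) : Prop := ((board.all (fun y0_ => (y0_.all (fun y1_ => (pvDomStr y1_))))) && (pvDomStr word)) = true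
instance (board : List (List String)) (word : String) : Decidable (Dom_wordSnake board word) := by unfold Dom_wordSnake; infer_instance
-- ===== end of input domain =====

-- B replaces A's char→cell-list index plus end-of-path duplicate check by the standard
-- self-avoiding word-search DFS over the four neighbours of the current cell (objective: idiomatic).

-- ===== PORT A =====

-- board[r][c]; the `.getD` defaults are unreachable on Pre_-admitted indexing (Python raises IndexError on ragged rows, excluded by Pre_)
def cellAt (board : List (List String)) (r c : Int) : String :=
  (PySem.List.pyGet? ((PySem.List.pyGet? board r).getD []) c).getD ""

-- the adjacency test of A's `continue` guard: (abs(qr-r)==1 and qc==c) or (qr==r and abs(qc-c)==1)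
def adjA (q p : Int × Int) : Bool :=
  ((q.1 - p.1).natAbs == 1 && q.2 == p.2) || (q.1 == p.1 && (q.2 - p.2).natAbs == 1)

-- d = defaultdict(list); for r in range(R): for c in range(C): d[board[r][c]].append([r,c])
def buildD (board : List (List String)) (R C : Int) : PySem.Dict String (List (Int × Int)) :=
  (PySem.List.pyRange 0 R).foldl (fun d r =>
    (PySem.List.pyRange 0 C).foldl (fun d c =>
      d.insert (cellAt board r c) (d.getD (cellAt board r c) [] ++ [(r, c)])) d)
    PySem.Dict.empty

def traverseA (d : PySem.Dict String (List (Int × Int))) : List (Int × Int) → List Char → Bool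
  | visited, [] => visited.length == (PySem.Set.ofList visited).length
  | visited, ch :: rest =>
      (d.getD (String.ofList [ch]) []).any (fun p =>
        if 0 < visited.length && !(match visited.getLast? with
            | some q => adjA q p
            | none => false)
        then false
        else traverseA d (visited ++ [p]) rest)

def wordSnake (board : List (List String)) (word : String) : Bool :=
  if board.length == 0 || (board.headD []).length == 0 then false
  else if word.toList.length == 0 then true
  else traverseA (buildD board (board.length : Int) ((board.headD []).length : Int)) [] word.toList

-- ===== PORT B =====

def dfsB (board : List (List String)) (R C : Int) : Int → Int → List Char → PySem.Set (Int × Int) → Bool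
  | _, _, [], _ => true
  | r, c, ch :: rest, visited =>
      [(r + 1, c), (r - 1, c), (r, c + 1), (r, c - 1)].any (fun p =>
        (decide (0 ≤ p.1) && decide (p.1 < R) && decide (0 ≤ p.2) && decide (p.2 < C) &&
          !(List.contains visited p) && cellAt board p.1 p.2 == String.ofList [ch]) &&
        dfsB board R C p.1 p.2 rest (visited.add p))

def wordSnake_alt (board : List (List String)) (word : String) : Bool :=
  if board.length == 0 || (board.headD []).length == 0 then false
  else if word.toList.length == 0 then true
  else
    match word.toList with
    | [] => false  -- unreachable: guarded by the emptiness test above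
    | ch :: rest =>
      (PySem.List.pyRange 0 (board.length : Int)).any (fun r =>
        (PySem.List.pyRange 0 ((board.headD []).length : Int)).any (fun c =>
          cellAt board r c == String.ofList [ch] &&
          dfsB board (board.length : Int) ((board.headD []).length : Int) r c rest
            (PySem.Set.ofList [(r, c)])))

-- ===== PRECONDITION & SPEC =====
-- Pre_ excludes exactly the ragged boards on which Python A raises IndexError: a row shorter than
-- row 0 gets indexed up to len(board[0])-1 (only reached when board, board[0] and word are all non-empty).
def Pre_wordSnake (board : List (List String)) (word : String) : Prop :=
  board = [] ∨ board.headD [] = [] ∨ word = "" ∨ ∀ row ∈ board, (board.headD []).length ≤ row.length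
instance (board : List (List String)) (word : String) : Decidable (Pre_wordSnake board word) := by unfold Pre_wordSnake; infer_instance
def pvWitness_wordSnake : List (List String) × String := ([["a", "b"], ["c", "d"]], "ab")

def Spec_wordSnake (board : List (List String)) (word : String) (out : Bool) : Prop := out = wordSnake_alt board word
instance (board : List (List String)) (word : String) (out : Bool) : Decidable (Spec_wordSnake board word out) := by unfold Spec_wordSnake; infer_instance

-- ===== CLAIM (what is proved, stated in full; the proofs are below) =====
def Claim_equal_wordSnake : Prop := ∀ (board : List (List String)) (word : String), Dom_wordSnake board word → Pre_wordSnake board word → Spec_wordSnake board word (wordSnake board word)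

-- ===== LEMMAS AND PROOFS =====

-- the adjacency relation both searches walk along
def Adj (q p : Int × Int) : Prop := adjA q p = true

-- "cell p is in the R×C grid and carries the one-character string ch"
def Good (board : List (List String)) (R C : Int) (ch : Char) (p : Int × Int) : Prop :=
  0 ≤ p.1 ∧ p.1 < R ∧ 0 ≤ p.2 ∧ p.2 < C ∧ cellAt board p.1 p.2 = String.ofList [ch]

-- the previous path cell as A's traverse sees it: none when the path so far is empty
def ChainFrom (q? : Option (Int × Int)) (l : List (Int × Int)) : Prop :=
  match q? with
  | none => List.IsChain Adj l
  | some q => List.IsChain Adj (q :: l)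

def StepOK (v : List (Int × Int)) (p : Int × Int) : Prop :=
  match v.getLast? with
  | none => True
  | some q0 => Adj q0 p

lemma mem_neighbors_iff (r c : Int) (p : Int × Int) :
    p ∈ [(r + 1, c), (r - 1, c), (r, c + 1), (r, c - 1)] ↔ Adj (r, c) p := by
  obtain ⟨a, b⟩ := p
  simp [Adj, adjA, Prod.ext_iff]
  omega

lemma getD_build (board : List (List String)) (L : List (Int × Int))
    (d : PySem.Dict String (List (Int × Int))) (s : String) :
    (L.foldl (fun d p => d.insert (cellAt board p.1 p.2)
        (d.getD (cellAt board p.1 p.2) [] ++ [p])) d).getD s [] =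
      d.getD s [] ++ L.filter (fun p => cellAt board p.1 p.2 == s) := by
  induction L generalizing d with
  | nil => simp
  | cons p L ih =>
      simp only [List.foldl_cons, ih, List.filter_cons]
      rw [PySem.Dict.getD_insert]
      by_cases h : cellAt board p.1 p.2 = s
      · simp [h]
      · simp [h, Ne.symm h]

lemma mem_buildD (board : List (List String)) (R C : Int) (s : String) (p : Int × Int) :
    p ∈ (buildD board R C).getD s [] ↔
      0 ≤ p.1 ∧ p.1 < R ∧ 0 ≤ p.2 ∧ p.2 < C ∧ cellAt board p.1 p.2 = s := by
  have hflat : buildD board R C =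
      ((PySem.List.pyRange 0 R).flatMap (fun r => (PySem.List.pyRange 0 C).map (fun c => (r, c)))).foldl
        (fun d p => d.insert (cellAt board p.1 p.2) (d.getD (cellAt board p.1 p.2) [] ++ [p]))
        PySem.Dict.empty := by
    rw [buildD, List.foldl_flatMap]
    simp only [List.foldl_map]
  rw [hflat, getD_build, PySem.Dict.getD_empty]
  simp only [List.nil_append, List.mem_filter, List.mem_flatMap, List.mem_map]
  constructor
  · rintro ⟨⟨r, hr, c, hc, rfl⟩, hcell⟩
    rw [PySem.List.mem_pyRange_one] at hr hc
    exact ⟨hr.1, hr.2, hc.1, hc.2, by simpa using hcell⟩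
  · rintro ⟨h1, h2, h3, h4, h5⟩
    refine ⟨⟨p.1, ?_, p.2, ?_, rfl⟩, by simpa using h5⟩ <;> rw [PySem.List.mem_pyRange_one] <;> omega

-- len(visited) == len(set(visited)) is exactly Nodup
lemma ofList_aux (l s : List (Int × Int)) (hs : s.Nodup) :
    ((l.foldl PySem.Set.add s).length = s.length + l.length ↔ (s ++ l).Nodup) := by
  induction l generalizing s with
  | nil => simpa using hs
  | cons x l ih =>
      have hle : ∀ (l' s' : List (Int × Int)), (l'.foldl PySem.Set.add s').length ≤ s'.length + l'.length := by
        intro l'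
        induction l' with
        | nil => simp
        | cons y l' ih2 =>
            intro s'
            simp only [List.foldl_cons]
            refine le_trans (ih2 _) ?_
            unfold PySem.Set.add
            split_ifs <;> simp <;> omega
      by_cases h : x ∈ s
      · have hxs : PySem.Set.add s x = s := by simp [PySem.Set.add, h]
        simp only [List.foldl_cons, hxs, List.length_cons]
        constructor
        · intro he
          exfalso
          have := hle l s
          omega
        · intro hnd
          exfalso
          rw [List.nodup_append] at hnd
          exact hnd.2.2 x h x List.mem_cons_self rfl
      · have hadd : PySem.Set.add s x = s ++ [x] := by simp [PySem.Set.add, h]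
        have h2 : (s ++ [x]).Nodup := by
          rw [List.nodup_append]
          refine ⟨hs, by simp, ?_⟩
          intro a ha b hb
          simp at hb
          subst hb
          intro he; exact h (he ▸ ha)
        have hiff := ih (s ++ [x]) h2
        simp only [List.foldl_cons, hadd, List.length_append,
          List.length_cons, List.length_nil] at hiff ⊢
        rw [List.append_assoc] at hiff
        simp only [List.singleton_append] at hiff
        rw [← hiff]
        omega

lemma ofList_length_eq_iff (l : List (Int × Int)) :
    (l.length == (PySem.Set.ofList l).length) = true ↔ l.Nodup := by
  have h := ofList_aux l [] (by simp)
  simp only [List.nil_append, List.length_nil, Nat.zero_add] at h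
  rw [beq_iff_eq, PySem.Set.ofList, ← h]
  have : (PySem.Set.empty : PySem.Set (Int × Int)) = ([] : List (Int × Int)) := rfl
  rw [this]
  omega

lemma chainFrom_cons (v : List (Int × Int)) (p : Int × Int) (q' : List (Int × Int)) :
    ChainFrom v.getLast? (p :: q') ↔ StepOK v p ∧ List.IsChain Adj (p :: q') := by
  cases hv : v.getLast? <;>
    simp [ChainFrom, StepOK, hv, List.isChain_cons_cons]

lemma stepOK_iff_cond (v : List (Int × Int)) (p : Int × Int) :
    (0 < v.length && !(match v.getLast? with
        | some q => adjA q p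
        | none => false)) = false ↔ StepOK v p := by
  cases hv : v.getLast? with
  | none =>
      have : v = [] := List.getLast?_eq_none_iff.mp hv
      subst this
      simp [StepOK]
  | some q0 =>
      have hne : v ≠ [] := by
        intro h; subst h; simp at hv
      have hlen : 0 < v.length := List.length_pos_iff.mpr hne
      simp [StepOK, hv, hlen, Adj]

-- A's traverse finds an extension iff a Good, Adj-chained continuation exists that keeps the whole
-- visited list duplicate-free (A only checks duplicates at the very end).
lemma traverseA_iff (board : List (List String)) (R C : Int) :
    ∀ (rest : List Char) (visited : List (Int × Int)),
      traverseA (buildD board R C) visited rest = true ↔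
        ∃ q, List.Forall₂ (Good board R C) rest q ∧ ChainFrom visited.getLast? q ∧
          (visited ++ q).Nodup := by
  intro rest
  induction rest with
  | nil =>
      intro visited
      simp only [traverseA, ofList_length_eq_iff]
      constructor
      · intro h
        exact ⟨[], List.Forall₂.nil, by cases visited.getLast? <;>
          simp [ChainFrom, List.IsChain.singleton], by simpa using h⟩
      · rintro ⟨q, hf, _, hnd⟩
        cases hf
        simpa using hnd
  | cons ch rest ih =>
      intro visited
      simp only [traverseA, List.any_eq_true]
      constructor
      · rintro ⟨p, hp, hf⟩
        rw [mem_buildD] at hp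
        rcases hcond : (0 < visited.length && !(match visited.getLast? with
            | some q => adjA q p
            | none => false)) with _ | _
        · rw [hcond] at hf
          simp only [if_false, Bool.false_eq_true] at hf
          rcases (ih (visited ++ [p])).mp hf with ⟨q', hf', hc', hnd'⟩
          rw [List.getLast?_concat] at hc'
          refine ⟨p :: q', List.Forall₂.cons hp hf', ?_, ?_⟩
          · exact (chainFrom_cons visited p q').mpr ⟨(stepOK_iff_cond visited p).mp hcond, hc'⟩
          · simpa [List.append_assoc] using hnd'
        · rw [hcond] at hf
          simp at hf
      · rintro ⟨q, hf, hc, hnd⟩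
        rcases List.forall₂_cons_left_iff.mp hf with ⟨p, q', hp, hf', rfl⟩
        refine ⟨p, (mem_buildD board R C _ p).mpr hp, ?_⟩
        rcases (chainFrom_cons visited p q').mp hc with ⟨hstep, hchain⟩
        rw [(stepOK_iff_cond visited p).mpr hstep]
        simp only [if_false, Bool.false_eq_true]
        refine (ih (visited ++ [p])).mpr ⟨q', hf', ?_, ?_⟩
        · rw [List.getLast?_concat]; exact hchain
        · simpa [List.append_assoc] using hnd

-- B's dfs succeeds iff a Good, Adj-chained, self-avoiding continuation disjoint from `vis` exists.
lemma dfsB_iff (board : List (List String)) (R C : Int) :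
    ∀ (rest : List Char) (r c : Int) (vis : PySem.Set (Int × Int)),
      dfsB board R C r c rest vis = true ↔
        ∃ q, List.Forall₂ (Good board R C) rest q ∧ List.IsChain Adj ((r, c) :: q) ∧
          q.Nodup ∧ ∀ x ∈ q, ¬ x ∈ (vis : List (Int × Int)) := by
  intro rest
  induction rest with
  | nil =>
      intro r c vis
      simp only [dfsB]
      constructor
      · intro _
        exact ⟨[], List.Forall₂.nil, List.IsChain.singleton _, List.nodup_nil, by simp⟩
      · intro _; trivial
  | cons ch rest ih =>
      intro r c vis
      simp only [dfsB, List.any_eq_true]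
      constructor
      · rintro ⟨p, hpmem, hf⟩
        rw [Bool.and_eq_true] at hf
        obtain ⟨hcond, hrec⟩ := hf
        simp only [Bool.and_eq_true, decide_eq_true_eq, Bool.not_eq_true',
          beq_iff_eq] at hcond
        obtain ⟨⟨⟨⟨⟨h1, h2⟩, h3⟩, h4⟩, hnotin⟩, hcell⟩ := hcond
        have hnotin' : ¬ p ∈ (vis : List (Int × Int)) := by
          intro hin
          rw [List.contains_eq_mem, decide_eq_false_iff_not] at hnotin
          exact hnotin hin
        rcases (ih p.1 p.2 (vis.add p)).mp (by simpa using hrec) with ⟨q', hf', hc', hnd', hvis'⟩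
        refine ⟨p :: q', List.Forall₂.cons ⟨h1, h2, h3, h4, hcell⟩ hf', ?_, ?_, ?_⟩
        · rw [List.isChain_cons_cons]
          exact ⟨(mem_neighbors_iff r c p).mp hpmem, by simpa using hc'⟩
        · rw [List.nodup_cons]
          refine ⟨fun hin => ?_, hnd'⟩
          exact (hvis' p hin) ((PySem.Set.mem_add vis p p).mpr (Or.inr rfl))
        · intro x hx
          rcases List.mem_cons.mp hx with rfl | hx'
          · exact hnotin'
          · intro hinv
            exact hvis' x hx' ((PySem.Set.mem_add vis p x).mpr (Or.inl hinv))
      · rintro ⟨q, hf, hc, hnd, hvis⟩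
        rcases List.forall₂_cons_left_iff.mp hf with ⟨p, q', hp, hf', rfl⟩
        rw [List.isChain_cons_cons] at hc
        obtain ⟨hadj, hc'⟩ := hc
        rw [List.nodup_cons] at hnd
        refine ⟨p, (mem_neighbors_iff r c p).mpr hadj, ?_⟩
        rw [Bool.and_eq_true]
        obtain ⟨h1, h2, h3, h4, h5⟩ := hp
        constructor
        · simp only [Bool.and_eq_true, decide_eq_true_eq, Bool.not_eq_true', beq_iff_eq]
          refine ⟨⟨⟨⟨⟨h1, h2⟩, h3⟩, h4⟩, ?_⟩, h5⟩
          rw [List.contains_eq_mem, decide_eq_false_iff_not]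
          exact hvis p List.mem_cons_self
        · refine (ih p.1 p.2 (vis.add p)).mpr ⟨q', hf', by simpa using hc', hnd.2, ?_⟩
          intro x hx hmem
          rcases (PySem.Set.mem_add vis p x).mp hmem with hv | rfl
          · exact hvis x (List.mem_cons_of_mem _ hx) hv
          · exact hnd.1 hx

theorem wordSnake_eq (board : List (List String)) (word : String) :
    wordSnake board word = wordSnake_alt board word := by
  unfold wordSnake wordSnake_alt
  split_ifs with h1 h2
  · rfl
  · rfl
  · cases hw : word.toList with
    | nil => simp [hw] at h2
    | cons ch rest =>
        set R := (board.length : Int)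
        set C := ((board.headD []).length : Int)
        rw [Bool.eq_iff_iff]
        rw [traverseA_iff board R C (ch :: rest) []]
        simp only [List.any_eq_true]
        constructor
        · rintro ⟨q, hf, hc, hnd⟩
          rcases List.forall₂_cons_left_iff.mp hf with ⟨p0, q', hp0, hf', rfl⟩
          obtain ⟨h1', h2', h3', h4', h5'⟩ := hp0
          refine ⟨p0.1, PySem.List.mem_pyRange_one.mpr ⟨h1', h2'⟩,
            p0.2, PySem.List.mem_pyRange_one.mpr ⟨h3', h4'⟩, ?_⟩
          rw [Bool.and_eq_true, beq_iff_eq]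
          refine ⟨h5', ?_⟩
          rw [List.nil_append, List.nodup_cons] at hnd
          refine (dfsB_iff board R C rest p0.1 p0.2 _).mpr ⟨q', hf', ?_, hnd.2, ?_⟩
          · simpa [ChainFrom] using hc
          · intro x hx hmem
            have : x = (p0.1, p0.2) := by
              have := (PySem.Set.mem_ofList [(p0.1, p0.2)] x).mp hmem
              simpa using this
            rw [this] at hx
            exact hnd.1 (by simpa using hx)
        · rintro ⟨r, hr, c, hc', hf⟩
          rw [Bool.and_eq_true, beq_iff_eq] at hf
          obtain ⟨hcell, hdfs⟩ := hf
          rcases (dfsB_iff board R C rest r c _).mp hdfs with ⟨q', hf', hchain, hnd', hvis⟩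
          rw [PySem.List.mem_pyRange_one] at hr hc'
          refine ⟨(r, c) :: q', List.Forall₂.cons ⟨hr.1, hr.2, hc'.1, hc'.2, hcell⟩ hf', ?_, ?_⟩
          · simpa [ChainFrom] using hchain
          · rw [List.nil_append, List.nodup_cons]
            refine ⟨fun hin => ?_, hnd'⟩
            exact hvis _ hin ((PySem.Set.mem_ofList [(r, c)] (r, c)).mpr (by simp))

-- ===== VERDICT (by name: the statement is the Claim_ definition above) =====
theorem wordSnake_spec : Claim_equal_wordSnake := by
  intro board word _ _
  unfold Spec_wordSnake
  exact wordSnake_eq board word
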